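-- pv_equiv track=rewrite | github.com/Joeyqcy/Label_Extending | src/Label_Extending.py | _bulid_connected_parse_dict
-- ===== SOURCE A (Python) =====
-- def _bulid_connected_parse_dict(words, netags, arcs, index):
--     _connected_parse_dict = {}
--     _connected_parse_dict['parent'] = {}
--     _connected_parse_dict['child'] = {}
--     end_index = 0
--     for netag_index in range(index, len(netags)):
--         if netags[netag_index] in ['E-Ni', 'E-Nh']:
--             end_index = netag_index
--             break
--         elif netags[netag_index] == 'O':
--             end_index = netag_index - 1
--         else:
--             pass
--     for conn_index in range(index, end_index+1):
--         if arcs[conn_index] != 'ATT':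
--             _connected_parse_dict['parent'].setdefault(arcs[conn_index][1], [])
--             _connected_parse_dict['parent'][arcs[conn_index][1]].append(arcs[conn_index][0] - 1)
--     for arc_index, arc in enumerate(arcs):
--         if arc[0] - 1 in [conn_index for conn_index in range(index, end_index+1)]:
--             _connected_parse_dict['child'].setdefault(arc[1], [])
--             _connected_parse_dict['child'][arc[1]].append(arc_index)
--     return _connected_parse_dict
-- ===== SOURCE B (Python) =====
-- def _bulid_connected_parse_dict(words, netags, arcs, index):
--     # end index: first E-Ni/E-Nh at or after index; otherwise (last 'O' in the scan) - 1; otherwise 0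
--     scan = range(index, len(netags))
--     e = next((j for j in scan if netags[j] in ('E-Ni', 'E-Nh')), None)
--     if e is None:
--         os = [j for j in scan if netags[j] == 'O']
--         e = os[-1] - 1 if os else 0
--     span = [(i, arc) for i, arc in enumerate(arcs) if index <= i <= e]
--     hits = [(i, arc) for i, arc in enumerate(arcs) if index <= arc[0] - 1 <= e]
--     pkeys = []
--     for _, arc in span:
--         if arc[1] not in pkeys:
--             pkeys.append(arc[1])
--     ckeys = []
--     for _, arc in hits:
--         if arc[1] not in ckeys:
--             ckeys.append(arc[1])
--     parent = {k: [arc[0] - 1 for _, arc in span if arc[1] == k] for k in pkeys}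
--     child = {k: [i for i, arc in hits if arc[1] == k] for k in ckeys}
--     return {'parent': parent, 'child': child}
-- ===== Notes on version B (the rewrite author's own statement) =====
-- stated objective: alternative
-- what changed: Replaces A's accumulator scan for end_index by a closed-form search (first E-Ni/E-Nh tag, else last 'O' minus one, else 0) and replaces A's two dict-mutation loops (setdefault/append over a span range and over enumerate(arcs) with a materialised-range membership test) by group-by comprehensions: filter the enumerated arcs once per dict, collect first-occurrence keys, and build each value list by a per-key filter.
-- outside the precondition, e.g. on _bulid_connected_parse_dict(['a', 'b'], ['E-Ni', 'E-Ni'], [], 0): A raises IndexError, B returns {'parent': {}, 'child': {}}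
import Mathlib
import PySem

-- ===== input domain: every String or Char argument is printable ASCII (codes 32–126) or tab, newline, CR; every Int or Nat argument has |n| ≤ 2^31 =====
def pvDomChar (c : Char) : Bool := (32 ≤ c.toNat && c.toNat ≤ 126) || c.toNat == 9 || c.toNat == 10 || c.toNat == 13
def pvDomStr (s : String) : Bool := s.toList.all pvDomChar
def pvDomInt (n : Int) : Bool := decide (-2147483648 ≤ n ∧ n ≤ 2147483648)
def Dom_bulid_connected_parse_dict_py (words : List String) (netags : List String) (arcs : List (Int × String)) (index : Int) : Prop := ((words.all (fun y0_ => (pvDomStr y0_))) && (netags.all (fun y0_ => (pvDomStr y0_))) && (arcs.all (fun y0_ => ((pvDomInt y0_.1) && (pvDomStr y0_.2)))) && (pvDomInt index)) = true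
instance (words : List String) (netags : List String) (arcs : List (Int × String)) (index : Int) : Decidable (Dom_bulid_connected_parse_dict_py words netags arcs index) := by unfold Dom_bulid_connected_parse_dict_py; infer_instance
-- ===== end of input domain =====

-- ===== PORT A =====
-- B changes: closed-form end-index search (first E-tag, else last 'O' minus one) and
-- group-by comprehensions (first-occurrence keys + per-key filter) replace A's
-- accumulator scan and its two dict-mutation loops; objective: alternative.

-- A's first loop: 'for netag_index in range(index, len(netags)): break on E-Ni/E-Nh,
-- end_index = idx - 1 on O, else pass' as structural recursion over the range list
def pvEndLoopA (netags : List String) : List Int → Int → Int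
  | [], acc => acc
  | i :: rest, acc =>
    let t := PySem.List.pyGetD netags i ""
    if t ∈ ["E-Ni", "E-Nh"] then i
    else if t = "O" then pvEndLoopA netags rest (i - 1)
    else pvEndLoopA netags rest acc

def bulid_connected_parse_dict_py (words : List String) (netags : List String) (arcs : List (Int × String)) (index : Int) : List (String × List (String × List Int)) :=
  let end_index := pvEndLoopA netags (PySem.List.pyRange index (netags.length : Int)) 0
  -- second loop: for conn_index in range(index, end_index+1)
  let parent : PySem.Dict String (List Int) :=
    (PySem.List.pyRange index (end_index + 1)).foldl
      (fun d conn =>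
        let arc := PySem.List.pyGetD arcs conn (0, "")
        -- Python's "arcs[conn_index] != 'ATT'" compares a tuple with a str: always True
        if true then d.modify arc.2 [] (fun l => l ++ [arc.1 - 1]) else d)
      PySem.Dict.empty
  -- third loop: for arc_index, arc in enumerate(arcs), membership in the range list
  let child : PySem.Dict String (List Int) :=
    (PySem.List.enumerate arcs).foldl
      (fun d p =>
        if (p.2.1 - 1) ∈ PySem.List.pyRange index (end_index + 1)
        then d.modify p.2.2 [] (fun l => l ++ [p.1]) else d)
      PySem.Dict.empty
  [("parent", parent.items), ("child", child.items)]

-- ===== PORT B =====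
def bulid_connected_parse_dict_py_alt (words : List String) (netags : List String) (arcs : List (Int × String)) (index : Int) : List (String × List (String × List Int)) :=
  let scan := PySem.List.pyRange index (netags.length : Int)
  -- e = next((j for j in scan if netags[j] in ('E-Ni','E-Nh')), None); fallback: last 'O' - 1, else 0
  let e : Int :=
    (scan.find? (fun j => decide (PySem.List.pyGetD netags j "" ∈ ["E-Ni", "E-Nh"]))).getD
      (((scan.filter (fun j => PySem.List.pyGetD netags j "" == "O")).getLast?.map (fun j => j - 1)).getD 0)
  let span := (PySem.List.enumerate arcs).filter (fun p => decide (index ≤ p.1 ∧ p.1 ≤ e))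
  let hits := (PySem.List.enumerate arcs).filter (fun p => decide (index ≤ p.2.1 - 1 ∧ p.2.1 - 1 ≤ e))
  let pkeys := PySem.Set.ofList (span.map (fun p => p.2.2))
  let ckeys := PySem.Set.ofList (hits.map (fun p => p.2.2))
  let parent := pkeys.map (fun k => (k, (span.filter (fun p => p.2.2 == k)).map (fun p => p.2.1 - 1)))
  let child := ckeys.map (fun k => (k, (hits.filter (fun p => p.2.2 == k)).map (fun p => p.1)))
  [("parent", parent), ("child", child)]

-- ===== PRECONDITION & SPEC =====
-- Pre_ excludes: negative index (Python's wraparound makes A read arcs/netags from the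
-- end while B's bound filter sees an empty span); inputs with len(netags) > len(arcs)
-- whose scan also starts inside netags (the computed span can then index past arcs and
-- A raises IndexError; the bound is slightly wider than the exact crash set); and
-- index = 0 with empty arcs (A raises).
def Pre_bulid_connected_parse_dict_py (words : List String) (netags : List String) (arcs : List (Int × String)) (index : Int) : Prop :=
  0 ≤ index ∧ ((netags.length : Int) ≤ (arcs.length : Int) ∨ (netags.length : Int) ≤ index) ∧ (index = 0 → arcs ≠ [])
instance (words : List String) (netags : List String) (arcs : List (Int × String)) (index : Int) : Decidable (Pre_bulid_connected_parse_dict_py words netags arcs index) := by unfold Pre_bulid_connected_parse_dict_py; infer_instance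

def pvWitness_bulid_connected_parse_dict_py : List String × List String × (List (Int × String)) × Int :=
  (["w"], ["E-Ni"], [(1, "HED")], 0)

def Spec_bulid_connected_parse_dict_py (words : List String) (netags : List String) (arcs : List (Int × String)) (index : Int) (out : List (String × List (String × List Int))) : Prop := out = bulid_connected_parse_dict_py_alt words netags arcs index
instance (words : List String) (netags : List String) (arcs : List (Int × String)) (index : Int) (out : List (String × List (String × List Int))) : Decidable (Spec_bulid_connected_parse_dict_py words netags arcs index out) := by unfold Spec_bulid_connected_parse_dict_py; infer_instance

-- ===== CLAIM (what is proved, stated in full; the proofs are below) =====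
def Claim_equal_bulid_connected_parse_dict_py : Prop := ∀ (words : List String) (netags : List String) (arcs : List (Int × String)) (index : Int), Dom_bulid_connected_parse_dict_py words netags arcs index → Pre_bulid_connected_parse_dict_py words netags arcs index → Spec_bulid_connected_parse_dict_py words netags arcs index (bulid_connected_parse_dict_py words netags arcs index)

-- ===== LEMMAS AND PROOFS =====

-- A's end-index scan equals B's closed form: first matching E-tag, else last O minus 1, else acc
lemma pv_end_eq (netags : List String) (r : List Int) : ∀ (acc : Int),
    pvEndLoopA netags r acc
      = (r.find? (fun j => decide (PySem.List.pyGetD netags j "" ∈ ["E-Ni", "E-Nh"]))).getD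
          (((r.filter (fun j => PySem.List.pyGetD netags j "" == "O")).getLast?.map (fun j => j - 1)).getD acc) := by
  induction r with
  | nil => intro acc; rfl
  | cons i rest ih =>
    intro acc
    by_cases hE : PySem.List.pyGetD netags i "" ∈ ["E-Ni", "E-Nh"]
    · rw [List.find?_cons_of_pos (by simpa using hE), Option.getD_some]
      simp [pvEndLoopA, hE]
    · by_cases hO : PySem.List.pyGetD netags i "" = "O"
      · have h1 : pvEndLoopA netags (i :: rest) acc = pvEndLoopA netags rest (i - 1) := by
          simp [pvEndLoopA, hO]
        rw [h1, ih (i - 1),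
          List.find?_cons_of_neg (by simpa using hE),
          List.filter_cons_of_pos (by simpa using hO)]
        cases hf : rest.find? (fun j => decide (PySem.List.pyGetD netags j "" ∈ ["E-Ni", "E-Nh"])) with
        | some j => rfl
        | none =>
          simp only [Option.getD_none]
          cases hl : (rest.filter (fun j => PySem.List.pyGetD netags j "" == "O")).getLast? with
          | some j => rw [List.getLast?_cons, hl]; rfl
          | none =>
            rw [List.getLast?_cons, hl]
            rfl
      · have h1 : pvEndLoopA netags (i :: rest) acc = pvEndLoopA netags rest acc := by
          simp [pvEndLoopA, hE, hO]
        rw [h1, ih acc,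
          List.find?_cons_of_neg (by simpa using hE),
          List.filter_cons_of_neg (by simpa using hO)]

-- a dict built by a modify-append loop, listed as items, IS the group-by:
-- first-occurrence keys, each with the in-order list of its values
lemma pv_group {A K : Type} [BEq K] [LawfulBEq K] (l : List A) (key : A → K) (val : A → Int) :
    (l.foldl (fun d a => d.modify (key a) [] (fun w => w ++ [val a])) PySem.Dict.empty).items
      = (PySem.Set.ofList (l.map key)).map
          (fun k => (k, (l.filter (fun a => key a == k)).map val)) := by
  set d := l.foldl (fun d a => d.modify (key a) [] (fun w => w ++ [val a])) PySem.Dict.empty with hd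
  have hnd : d.keys.Nodup := by
    rw [hd]
    exact PySem.Dict.nodup_keys_foldl_modify_key l key [] (fun d a => fun w => w ++ [val a])
      PySem.Dict.empty (by simp)
  have hkeys : d.keys = PySem.Set.ofList (l.map key) := by
    rw [hd, PySem.Dict.keys_foldl_modify_key]
    rfl
  rw [PySem.Dict.items_eq_map_keys d hnd [], hkeys]
  apply List.map_congr_left
  intro k _
  congr 1
  have hmap : d = (l.map (fun a => (key a, val a))).foldl
      (fun d p => d.modify p.1 [] (fun w => w ++ [p.2])) PySem.Dict.empty := by
    rw [hd, List.foldl_map]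
  rw [hmap, PySem.Dict.getD_foldl_modify_append]
  simp [PySem.Dict.getD_empty, List.filter_map, List.map_map, Function.comp_def]

-- the group-by expression depends only on the list of (key, value) pairs
lemma pv_group_of_map_eq {A B K V : Type} [BEq K] (l : List A) (m : List B)
    (k1 : A → K) (v1 : A → V) (k2 : B → K) (v2 : B → V)
    (h : l.map (fun a => (k1 a, v1 a)) = m.map (fun b => (k2 b, v2 b))) :
    (PySem.Set.ofList (l.map k1)).map (fun k => (k, (l.filter (fun a => k1 a == k)).map v1))
      = (PySem.Set.ofList (m.map k2)).map (fun k => (k, (m.filter (fun b => k2 b == k)).map v2)) := by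
  have h1 : l.map k1 = m.map k2 := by
    have := congrArg (List.map Prod.fst) h
    simpa [List.map_map, Function.comp] using this
  rw [h1]
  apply List.map_congr_left
  intro k _
  congr 1
  have h2 := congrArg (fun t => (t.filter (fun p : K × V => p.1 == k)).map Prod.snd) h
  simpa [List.filter_map, List.map_map, Function.comp] using h2

-- every index produced by enumerate(xs, s) is at least s
lemma pv_mem_enumerate_ge {a : Type} : ∀ (xs : List a) (s : Int) (p : Int × a),
    p ∈ PySem.List.enumerate xs s → s ≤ p.1 := by
  intro xs
  induction xs with
  | nil => intro s p h; simp [PySem.List.enumerate] at h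
  | cons x t ih =>
    intro s p h
    simp only [PySem.List.enumerate, List.mem_cons] at h
    rcases h with h | h
    · subst h; simp
    · have := ih (s + 1) p h; omega

lemma pv_pyGetD_cons {a : Type} (x : a) (t : List a) (i : Int) (d : a) (h : 1 ≤ i) :
    PySem.List.pyGetD (x :: t) i d = PySem.List.pyGetD t (i - 1) d := by
  have h0 : (0 : Int) ≤ i := by omega
  have h1 : (0 : Int) ≤ i - 1 := by omega
  simp only [PySem.List.pyGetD, PySem.List.pyGet?_of_nonneg _ h0,
    PySem.List.pyGet?_of_nonneg _ h1]
  have : i.toNat = (i - 1).toNat + 1 := by omega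
  rw [this, List.getElem?_cons_succ]

-- main bridge: B's filtered enumerate pass visits exactly the arcs A's range loop reads
lemma pv_enum_filter_map {a : Type} (d : a) (e : Int) :
    ∀ (xs : List a) (k i : Int), k ≤ i → (i ≤ e → e < k + (xs.length : Int)) →
    ((PySem.List.enumerate xs k).filter (fun p => decide (i ≤ p.1 ∧ p.1 ≤ e))).map Prod.snd
      = (PySem.List.pyRange i (e + 1)).map (fun c => PySem.List.pyGetD xs (c - k) d) := by
  intro xs
  induction xs with
  | nil =>
    intro k i hki h
    have he : ¬ i ≤ e := by intro hle; have := h hle; simp at this; omega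
    rw [PySem.List.pyRange_one]
    have : (e + 1 - i).toNat = 0 := by omega
    simp [PySem.List.enumerate, this]
  | cons x t ih =>
    intro k i hki h
    simp only [PySem.List.enumerate]
    by_cases hk : k < i
    · -- skip phase: head index k is below i
      rw [List.filter_cons_of_neg (by simp; omega)]
      rw [ih (k + 1) i (by omega) (by intro hie; have := h hie; simp at this ⊢; omega)]
      apply List.map_congr_left
      intro c hc
      rw [PySem.List.mem_pyRange_one] at hc
      rw [pv_pyGetD_cons x t (c - k) d (by omega)]
      congr 1; omega
    · -- k = i
      have hk' : k = i := by omega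
      subst hk'
      by_cases hke : k ≤ e
      · -- head is in the span
        rw [List.filter_cons_of_pos (by simp; omega)]
        rw [PySem.List.pyRange_one_cons (by omega)]
        simp only [List.map_cons]
        congr 1
        case _ =>
          rw [show k - k = (0 : Int) from by omega]
          simp [PySem.List.pyGetD]
        case _ =>
          rw [List.filter_congr (q := fun p : Int × a => decide (k + 1 ≤ p.1 ∧ p.1 ≤ e))
                (fun p hp => by
                  have := pv_mem_enumerate_ge t (k + 1) p hp
                  simp only [decide_eq_decide]
                  constructor <;> (intro hc; exact ⟨by omega, hc.2⟩))]
          rw [ih (k + 1) (k + 1) (by omega) (by intro _; have := h hke; simp at this ⊢; omega)]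
          apply List.map_congr_left
          intro c hc
          rw [PySem.List.mem_pyRange_one] at hc
          rw [pv_pyGetD_cons x t (c - k) d (by omega)]
          congr 1; omega
      · -- empty span: e < k, both sides are nil
        have hnil : ((k, x) :: PySem.List.enumerate t (k + 1)).filter
            (fun p => decide (k ≤ p.1 ∧ p.1 ≤ e)) = [] := by
          rw [List.filter_eq_nil_iff]
          intro p hp
          rcases List.mem_cons.mp hp with h1 | h1
          · subst h1; simp; omega
          · have := pv_mem_enumerate_ge t (k + 1) p h1; simp; omega
        rw [hnil, PySem.List.pyRange_one]
        have : (e + 1 - k).toNat = 0 := by omega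
        simp [this]

-- the end-index scan never reaches len(netags)
lemma pv_endLoop_lt (netags : List String) :
    ∀ (l : List Int) (acc : Int), (∀ i ∈ l, i < (netags.length : Int)) →
    acc < (netags.length : Int) → pvEndLoopA netags l acc < (netags.length : Int) := by
  intro l
  induction l with
  | nil => intro acc _ h; simpa [pvEndLoopA] using h
  | cons i rest ih =>
    intro acc hmem hacc
    have hi : i < (netags.length : Int) := hmem i (by simp)
    have hrest : ∀ j ∈ rest, j < (netags.length : Int) := fun j hj => hmem j (by simp [hj])
    simp only [pvEndLoopA]
    split_ifs with h1 h2
    · exact hi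
    · exact ih (i - 1) hrest (by omega)
    · exact ih acc hrest hacc

-- ===== VERDICT (by name: the statement is the Claim_ definition above) =====
theorem bulid_connected_parse_dict_py_spec : Claim_equal_bulid_connected_parse_dict_py := by
  intro words netags arcs index _ hpre
  obtain ⟨hix, hlen, hnil⟩ := hpre
  unfold Spec_bulid_connected_parse_dict_py
  unfold bulid_connected_parse_dict_py bulid_connected_parse_dict_py_alt
  dsimp only
  simp only [if_true]
  rw [← pv_end_eq netags (PySem.List.pyRange index (netags.length : Int)) 0]
  set e := pvEndLoopA netags (PySem.List.pyRange index (netags.length : Int)) 0 with he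
  -- the span, when nonempty, lies inside arcs
  have hbound : index ≤ e → e < (0 : Int) + (arcs.length : Int) := by
    intro hie
    by_cases hidx : (netags.length : Int) ≤ index
    · -- the scan starts at or past len(netags): e = 0, so index = 0 and arcs ≠ []
      have hre : PySem.List.pyRange index (netags.length : Int) = [] := by
        rw [PySem.List.pyRange_one]
        have : ((netags.length : Int) - index).toNat = 0 := by omega
        simp [this]
      rw [hre] at he
      have he0 : e = 0 := by simp [pvEndLoopA] at he; omega
      have hi0 : index = 0 := by omega
      have : 0 < arcs.length := List.length_pos_iff.mpr (hnil hi0)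
      omega
    · rcases hlen with hlen | hlen
      · have hpos : 0 < netags.length := by omega
        have := pv_endLoop_lt netags (PySem.List.pyRange index (netags.length : Int)) 0
          (fun i hi => (PySem.List.mem_pyRange_one.mp hi).2) (by exact_mod_cast hpos)
        rw [← he] at this
        omega
      · omega
  -- B's span of arcs, projected to the arcs themselves, is A's range of lookups
  have hspan : ((PySem.List.enumerate arcs).filter
        (fun p => decide (index ≤ p.1 ∧ p.1 ≤ e))).map Prod.snd
      = (PySem.List.pyRange index (e + 1)).map (fun c => PySem.List.pyGetD arcs c (0, "")) := by
    rw [pv_enum_filter_map (0, "") e arcs 0 index hix (by simpa using hbound)]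
    apply List.map_congr_left
    intro c _
    rw [show c - (0 : Int) = c from by omega]
  simp only [List.cons.injEq, Prod.mk.injEq, true_and, and_true]
  have hpairs : (PySem.List.pyRange index (e + 1)).map
        (fun c => ((PySem.List.pyGetD arcs c (0, "")).2, (PySem.List.pyGetD arcs c (0, "")).1 - 1))
      = ((PySem.List.enumerate arcs).filter (fun p => decide (index ≤ p.1 ∧ p.1 ≤ e))).map
          (fun p => (p.2.2, p.2.1 - 1)) := by
    have := congrArg (List.map (fun a : Int × String => (a.2, a.1 - 1))) hspan
    simpa [List.map_map, Function.comp_def] using this.symm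
  constructor
  · -- parent: A's range fold grouped = B's group-by over the span
    exact (pv_group (PySem.List.pyRange index (e + 1))
        (fun c => (PySem.List.pyGetD arcs c (0, "")).2)
        (fun c => (PySem.List.pyGetD arcs c (0, "")).1 - 1)).trans
      (pv_group_of_map_eq _ _ _ _ _ _ hpairs)
  · -- child: A's conditional fold filtered and grouped = B's group-by over the hits
    rw [PySem.List.foldl_ite_eq_foldl_filter
        (p := fun p : Int × (Int × String) => (p.2.1 - 1) ∈ PySem.List.pyRange index (e + 1))]
    rw [List.filter_congr (q := fun p : Int × (Int × String) =>
          decide (index ≤ p.2.1 - 1 ∧ p.2.1 - 1 ≤ e))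
        (fun p _ => by
          simp only [decide_eq_decide, PySem.List.mem_pyRange_one]
          omega)]
    exact pv_group ((PySem.List.enumerate arcs).filter
        (fun p => decide (index ≤ p.2.1 - 1 ∧ p.2.1 - 1 ≤ e)))
      (fun p => p.2.2) (fun p => p.1)
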